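-- pv_equiv track=rewrite | github.com/nikunjpanchal22/code_clone_classification | python_t4_full/Clone_872.py | num_subsequences
-- ===== SOURCE A (Python) =====
-- def num_subsequences(seq, sub):
-- 	if not sub:
-- 		return 1
-- 	if not seq:
-- 		return 0
-- 	end_1st = len(seq) - 1
-- 	end_2nd = len(sub) - 1
-- 	if seq[0] == sub[0] and seq[end_1st] == sub[end_2nd]:
-- 		start_match = num_subsequences(seq[1:end_1st], sub[1:end_2nd])
-- 	else:
-- 		start_match = 0
-- 	return start_match + num_subsequences(seq[1:], sub)
-- ===== SOURCE B (Python) =====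
-- def num_subsequences(seq, sub):
--     # A's recursion only ever sees slices seq[i:n-t] and sub[t:m-t]; tabulate
--     # f(i, t) over those index pairs bottom-up instead of recursing on copies.
--     n = len(seq)
--     m = len(sub)
--     tmax = (m + 1) // 2          # for 2*t >= m the sub slice is empty: value 1
--     row = [1] * (n + 1)          # row[i] = f(i, tmax)
--     for t in range(tmax - 1, -1, -1):
--         vals = []                # f(j, t) for j = n-t-1 down to i, as a running suffix sum
--         acc = 0
--         for i in range(n - t - 1, -1, -1):
--             if seq[i] == sub[t] and seq[n - t - 1] == sub[m - t - 1]: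
--                 acc += row[i + 1]
--             vals.append(acc)
--         row = vals[::-1] + [0] * (t + 1)
--     return row[0]
-- ===== Notes on version B (the rewrite author's own statement) =====
-- stated objective: faster
-- what changed: A's exponential recursion on string copies is replaced by a bottom-up dynamic-programming table: every slice A's recursion reaches has the form (seq[i:n-t], sub[t:m-t]), so B fills an (i,t) row table with suffix running sums and returns f(0,0).
import Mathlib
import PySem

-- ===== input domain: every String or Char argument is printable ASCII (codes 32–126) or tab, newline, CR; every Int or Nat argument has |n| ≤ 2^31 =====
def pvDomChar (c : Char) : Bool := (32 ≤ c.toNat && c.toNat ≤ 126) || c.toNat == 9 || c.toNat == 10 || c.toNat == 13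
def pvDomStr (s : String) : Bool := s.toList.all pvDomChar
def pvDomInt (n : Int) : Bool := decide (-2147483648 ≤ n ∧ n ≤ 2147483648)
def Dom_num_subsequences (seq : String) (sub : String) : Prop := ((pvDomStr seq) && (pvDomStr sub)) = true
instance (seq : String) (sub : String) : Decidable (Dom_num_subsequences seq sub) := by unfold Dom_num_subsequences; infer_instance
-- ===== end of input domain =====

-- B replaces A's exponential two-way recursion on string copies by an O(n·m) bottom-up
-- table over the only slice shapes A's recursion can reach (objective: faster, asymptotic).

-- ===== PORT A =====
-- literal transliteration of A's recursion, on List Char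
def numSubAuxA (seq : List Char) (sub : List Char) : Int :=
  if sub = [] then 1
  else if seq = [] then 0
  else
    let end1 : Int := (seq.length : Int) - 1
    let end2 : Int := (sub.length : Int) - 1
    let start_match : Int :=
      if PySem.List.pyGetD seq 0 ' ' = PySem.List.pyGetD sub 0 ' ' ∧
         PySem.List.pyGetD seq end1 ' ' = PySem.List.pyGetD sub end2 ' '
      then numSubAuxA (PySem.List.slice seq (some 1) (some end1))
                      (PySem.List.slice sub (some 1) (some end2))
      else 0
    start_match + numSubAuxA (PySem.List.slice seq (some 1) none) sub
termination_by seq.length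
decreasing_by
  · have h := PySem.List.length_slice seq (1 : Int) ((seq.length : Int) - 1)
    have h1 := PySem.List.clampIdx_le seq.length ((seq.length : Int) - 1)
    have h2 : PySem.List.clampIdx seq.length (1 : Int) = min 1 seq.length := by
      simp
    have hne : seq.length ≠ 0 := by simp [List.length_eq_zero_iff]; assumption
    omega
  · have h : PySem.List.slice seq (some 1) none = seq.tail := PySem.List.slice_from_one seq
    have hne : seq.length ≠ 0 := by simp [List.length_eq_zero_iff]; assumption
    simp [h, List.length_tail]; omega

def num_subsequences (seq : String) (sub : String) : Int :=
  numSubAuxA seq.toList sub.toList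

-- ===== PORT B =====
-- inner loop of Source B: running suffix sum acc, appending to vals
def altInner (s u : List Char) (n m t : Int) (row : List Int)
    (p : List Int × Int) (i : Int) : List Int × Int :=
  let acc : Int :=
    if PySem.List.pyGetD s i ' ' = PySem.List.pyGetD u t ' ' ∧
       PySem.List.pyGetD s (n - t - 1) ' ' = PySem.List.pyGetD u (m - t - 1) ' '
    then p.2 + PySem.List.pyGetD row (i + 1) 0
    else p.2
  (p.1 ++ [acc], acc)

-- body of Source B's outer loop: builds the next row from the previous one
def altOuter (s u : List Char) (n m : Int) (row : List Int) (t : Int) : List Int :=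
  let p := (PySem.List.pyRange (n - t - 1) (-1) (-1)).foldl (altInner s u n m t row) ([], 0)
  p.1.reverse ++ List.replicate (t + 1).toNat 0    -- vals[::-1] + [0]*(t+1); [::-1] is reverse (slice?_none_none_neg_one)

def num_subsequences_alt (seq : String) (sub : String) : Int :=
  let s := seq.toList
  let u := sub.toList
  let n : Int := (s.length : Int)
  let m : Int := (u.length : Int)
  let tmax : Int := PySem.Int.floordiv (m + 1) 2
  let row := (PySem.List.pyRange (tmax - 1) (-1) (-1)).foldl (altOuter s u n m)
               (List.replicate (n.toNat + 1) (1 : Int))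
  PySem.List.pyGetD row 0 0

-- ===== PRECONDITION & SPEC =====
def Spec_num_subsequences (seq : String) (sub : String) (out : Int) : Prop := out = num_subsequences_alt seq sub
instance (seq : String) (sub : String) (out : Int) : Decidable (Spec_num_subsequences seq sub out) := by unfold Spec_num_subsequences; infer_instance

-- ===== CLAIM (what is proved, stated in full; the proofs are below) =====
def Claim_equal_num_subsequences : Prop := ∀ (seq : String) (sub : String), Dom_num_subsequences seq sub → Spec_num_subsequences seq sub (num_subsequences seq sub)

-- ===== LEMMAS AND PROOFS =====

-- the common value: f i t = A's value on seq[i : n-t], sub[t : m-t]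
def Fdp (s u : List Char) (i t : Nat) : Int :=
  if 2 * t ≥ u.length then 1
  else if i + t ≥ s.length then 0
  else (if s.getD i ' ' = u.getD t ' ' ∧
           s.getD (s.length - t - 1) ' ' = u.getD (u.length - t - 1) ' '
        then Fdp s u (i + 1) (t + 1) else 0) + Fdp s u (i + 1) t
termination_by s.length - i
decreasing_by all_goals omega

theorem getD_take_drop (s : List Char) (a k j : Nat) (hj : j < k) (_hk : a + k ≤ s.length) :
    (List.take k (s.drop a)).getD j ' ' = s.getD (a + j) ' ' := by
  rw [List.getD_eq_getElem?_getD, List.getD_eq_getElem?_getD]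
  rw [List.getElem?_take_of_lt hj, List.getElem?_drop]

theorem A_eq_Fdp (s u : List Char) (i t : Nat) :
    numSubAuxA ((s.drop i).take (s.length - t - i)) ((u.drop t).take (u.length - t - t))
      = Fdp s u i t := by
  induction i, t using Fdp.induct s u with
  | case1 i t h =>
    have hu : (u.drop t).take (u.length - t - t) = [] := by
      have : u.length - t - t = 0 := by omega
      simp [this]
    rw [Fdp, numSubAuxA]
    simp [hu, h]
  | case2 i t h hn =>
    have hs : (s.drop i).take (s.length - t - i) = [] := by
      have : s.length - t - i = 0 := by omega
      simp [this]
    have hune : (u.drop t).take (u.length - t - t) ≠ [] := by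
      simp [List.length_eq_zero_iff.symm]
      omega
    rw [Fdp, numSubAuxA]
    simp [hune, h, hn]
  | case3 i t h hn ih1 ih2 =>
    have hune : (List.take (u.length - t - t) (u.drop t)) ≠ [] := by
      rw [← List.length_pos_iff, List.length_take, List.length_drop]
      omega
    have hsne : (List.take (s.length - t - i) (s.drop i)) ≠ [] := by
      rw [← List.length_pos_iff, List.length_take, List.length_drop]
      omega
    have hlenS : (List.take (s.length - t - i) (s.drop i)).length = s.length - t - i := by
      rw [List.length_take, List.length_drop]; omega
    have hlenU : (List.take (u.length - t - t) (u.drop t)).length = u.length - t - t := by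
      rw [List.length_take, List.length_drop]; omega
    rw [numSubAuxA, if_neg hune, if_neg hsne]
    simp only [hlenS, hlenU]
    have ecS : ((s.length - t - i : Nat) : Int) - 1 = ((s.length - t - i - 1 : Nat) : Int) := by omega
    have ecU : ((u.length - t - t : Nat) : Int) - 1 = ((u.length - t - t - 1 : Nat) : Int) := by omega
    rw [ecS, ecU]
    have hg0 : PySem.List.pyGetD (List.take (s.length - t - i) (s.drop i)) 0 ' ' = s.getD i ' ' := by
      rw [PySem.List.pyGetD_zero, getD_take_drop s i _ 0 (by omega) (by omega), Nat.add_zero]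
    have hg1 : PySem.List.pyGetD (List.take (u.length - t - t) (u.drop t)) 0 ' ' = u.getD t ' ' := by
      rw [PySem.List.pyGetD_zero, getD_take_drop u t _ 0 (by omega) (by omega), Nat.add_zero]
    have hg2 : PySem.List.pyGetD (List.take (s.length - t - i) (s.drop i)) ((s.length - t - i - 1 : Nat) : Int) ' ' = s.getD (s.length - t - 1) ' ' := by
      rw [PySem.List.pyGetD_natCast, getD_take_drop s i _ _ (by omega) (by omega)]
      congr 1; omega
    have hg3 : PySem.List.pyGetD (List.take (u.length - t - t) (u.drop t)) ((u.length - t - t - 1 : Nat) : Int) ' ' = u.getD (u.length - t - 1) ' ' := by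
      rw [PySem.List.pyGetD_natCast, getD_take_drop u t _ _ (by omega) (by omega)]
      congr 1; omega
    have hs1 : PySem.List.slice (List.take (s.length - t - i) (s.drop i)) (some 1) (some ((s.length - t - i - 1 : Nat) : Int))
        = List.take (s.length - (t+1) - (i+1)) (s.drop (i+1)) := by
      rw [PySem.List.slice_toNat]
      · rw [List.drop_take, List.take_take, List.drop_drop]
        simp only [Int.toNat_natCast, Int.toNat_one]
        congr 1
        omega
      · omega
      · omega
    have hs2 : PySem.List.slice (List.take (u.length - t - t) (u.drop t)) (some 1) (some ((u.length - t - t - 1 : Nat) : Int))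
        = List.take (u.length - (t+1) - (t+1)) (u.drop (t+1)) := by
      rw [PySem.List.slice_toNat]
      · rw [List.drop_take, List.take_take, List.drop_drop]
        simp only [Int.toNat_natCast, Int.toNat_one]
        congr 1
        omega
      · omega
      · omega
    have hs3 : PySem.List.slice (List.take (s.length - t - i) (s.drop i)) (some 1) none
        = List.take (s.length - t - (i+1)) (s.drop (i+1)) := by
      rw [PySem.List.slice_from_one, ← List.drop_one, List.drop_take, List.drop_drop]
      congr 1
    rw [hg0, hg1, hg2, hg3, hs1, hs2, hs3, ih1, ih2]
    conv_rhs => rw [Fdp]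
    rw [if_neg h, if_neg hn]

theorem Fdp_one (s u : List Char) (i t : Nat) (h : 2 * t ≥ u.length) : Fdp s u i t = 1 := by
  rw [Fdp]; simp [h]

theorem Fdp_zero (s u : List Char) (i t : Nat) (h : ¬ 2 * t ≥ u.length) (hn : i + t ≥ s.length) :
    Fdp s u i t = 0 := by
  rw [Fdp]; simp [h, hn]

-- row agrees with the spec column t on every index 0..n
def rowGood (s u : List Char) (t : Nat) (row : List Int) : Prop :=
  ∀ j : Nat, j ≤ s.length → PySem.List.pyGetD row (j : Int) 0 = Fdp s u j t

theorem inner_step (s u : List Char) (tn k : Nat) (row : List Int) (v : List Int)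
    (hm : ¬ 2 * tn ≥ u.length) (hk : k + tn + 1 ≤ s.length)
    (hrow : rowGood s u (tn + 1) row) :
    altInner s u (s.length : Int) (u.length : Int) (tn : Int) row (v, Fdp s u (k + 1) tn) (k : Int)
      = (v ++ [Fdp s u k tn], Fdp s u k tn) := by
  unfold altInner
  have e1 : ((s.length : Int) - (tn : Int) - 1) = ((s.length - tn - 1 : Nat) : Int) := by omega
  have e2 : ((u.length : Int) - (tn : Int) - 1) = ((u.length - tn - 1 : Nat) : Int) := by omega
  have e3 : ((k : Int) + 1) = ((k + 1 : Nat) : Int) := by omega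
  rw [e1, e2, e3]
  simp only [PySem.List.pyGetD_natCast]
  have hr := hrow (k + 1) (by omega)
  rw [PySem.List.pyGetD_natCast] at hr
  rw [hr]
  have hacc : (if s.getD k ' ' = u.getD tn ' ' ∧
        s.getD (s.length - tn - 1) ' ' = u.getD (u.length - tn - 1) ' '
      then Fdp s u (k + 1) tn + Fdp s u (k + 1) (tn + 1)
      else Fdp s u (k + 1) tn) = Fdp s u k tn := by
    conv_rhs => rw [Fdp]
    rw [if_neg hm, if_neg (by omega : ¬ k + tn ≥ s.length)]
    split_ifs with hc
    · ring
    · ring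
  simp only [List.getD_eq_getElem?_getD] at hacc
  simp [hacc]

theorem inner_fold (s u : List Char) (tn : Nat) (row : List Int)
    (hm : ¬ 2 * tn ≥ u.length) (hrow : rowGood s u (tn + 1) row) :
    ∀ (jj : Nat), jj + tn ≤ s.length → ∀ (v : List Int) (a : Int), a = Fdp s u jj tn →
    (PySem.List.pyRange ((jj : Int) - 1) (-1) (-1)).foldl
        (altInner s u (s.length : Int) (u.length : Int) (tn : Int) row) (v, a)
      = (v ++ (PySem.List.pyRange ((jj : Int) - 1) (-1) (-1)).map (fun i => Fdp s u i.toNat tn),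
         Fdp s u 0 tn) := by
  intro jj
  induction jj with
  | zero =>
    intro _ v a ha
    rw [PySem.List.pyRange_neg_one_eq_nil (by omega)]
    simp [ha]
  | succ k ih =>
    intro hj v a ha
    subst ha
    have ec : ((k + 1 : Nat) : Int) - 1 = (k : Int) := by omega
    rw [ec, PySem.List.pyRange_neg_one_cons (by omega)]
    rw [List.foldl_cons, List.map_cons]
    rw [inner_step s u tn k row v hm (by omega) hrow]
    rw [ih (by omega) (v ++ [Fdp s u k tn]) _ rfl]
    simp [Int.toNat_natCast]

theorem outer_step (s u : List Char) (tn : Nat) (row : List Int)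
    (hm : ¬ 2 * tn ≥ u.length) (hrow : rowGood s u (tn + 1) row) :
    rowGood s u tn (altOuter s u (s.length : Int) (u.length : Int) row (tn : Int)) := by
  unfold altOuter
  have etn : (((tn : Int)) + 1).toNat = tn + 1 := by omega
  by_cases htn : tn ≤ s.length
  · have ec : ((s.length : Int) - (tn : Int) - 1) = ((s.length - tn : Nat) : Int) - 1 := by omega
    rw [ec, inner_fold s u tn row hm hrow (s.length - tn) (by omega) [] 0
          (by rw [Fdp_zero s u _ tn hm (by omega)])]
    simp only [List.nil_append, etn]
    rw [PySem.List.pyRange_neg_one_eq_reverse]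
    simp only [List.map_reverse, List.reverse_reverse]
    have hb0 : (-1 : Int) + 1 = 0 := by norm_num
    have hb1 : ((s.length - tn : Nat) : Int) - 1 + 1 = ((s.length - tn : Nat) : Int) := by ring
    rw [hb0, hb1]
    intro j hj
    have hlen : ((PySem.List.pyRange 0 ((s.length - tn : Nat) : Int) 1).map
        (fun i => Fdp s u i.toNat tn)).length = s.length - tn := by
      rw [List.length_map, PySem.List.length_pyRange_one]; omega
    rw [PySem.List.pyGetD_natCast, List.getD_eq_getElem?_getD]
    by_cases hjk : j < s.length - tn
    · rw [List.getElem?_append_left (by rw [hlen]; omega)]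
      rw [PySem.List.getElem?_map_pyRange_zero _ _ _ (by omega)]
      simp [Int.toNat_natCast]
    · rw [List.getElem?_append_right (by rw [hlen]; omega)]
      rw [hlen, List.getElem?_replicate, if_pos (by omega)]
      rw [Fdp_zero s u j tn hm (by omega)]
      rfl
  · rw [PySem.List.pyRange_neg_one_eq_nil (by omega)]
    simp only [List.foldl_nil, List.reverse_nil, List.nil_append, etn]
    intro j hj
    rw [PySem.List.pyGetD_natCast, List.getD_eq_getElem?_getD, List.getElem?_replicate]
    rw [if_pos (by omega)]
    rw [Fdp_zero s u j tn hm (by omega)]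
    rfl

theorem outer_fold (s u : List Char) :
    ∀ (T : Nat) (row : List Int), 2 * T ≤ u.length + 1 → rowGood s u T row →
    rowGood s u 0 ((PySem.List.pyRange ((T : Int) - 1) (-1) (-1)).foldl
        (altOuter s u (s.length : Int) (u.length : Int)) row) := by
  intro T
  induction T with
  | zero =>
    intro row _ hrow
    rw [PySem.List.pyRange_neg_one_eq_nil (by omega)]
    simpa using hrow
  | succ k ih =>
    intro row hT hrow
    have ec : ((k + 1 : Nat) : Int) - 1 = (k : Int) := by omega
    rw [ec, PySem.List.pyRange_neg_one_cons (by omega), List.foldl_cons]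
    have hstep := outer_step s u k row (by omega) hrow
    have ec2 : (k : Int) - 1 = ((k : Nat) : Int) - 1 := by omega
    exact ih _ (by omega) hstep

theorem B_eq_Fdp (seq sub : String) :
    num_subsequences_alt seq sub = Fdp seq.toList sub.toList 0 0 := by
  unfold num_subsequences_alt
  simp only []
  set s := seq.toList
  set u := sub.toList
  have htm : PySem.Int.floordiv ((u.length : Int) + 1) 2 = (((u.length + 1) / 2 : Nat) : Int) := by
    rw [PySem.Int.floordiv_eq_iff_of_pos (by omega)]
    omega
  rw [htm]
  have hstart : rowGood s u ((u.length + 1) / 2) (List.replicate ((s.length : Int).toNat + 1) 1) := by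
    intro j hj
    rw [PySem.List.pyGetD_natCast, List.getD_eq_getElem?_getD, List.getElem?_replicate]
    rw [if_pos (by omega)]
    rw [Fdp_one s u j _ (by omega)]
    rfl
  have hfold := outer_fold s u ((u.length + 1) / 2) _ (by omega) hstart
  have := hfold 0 (by omega)
  simpa using this

-- ===== VERDICT (by name: the statement is the Claim_ definition above) =====
theorem num_subsequences_spec : Claim_equal_num_subsequences := by
  intro seq sub _
  unfold Spec_num_subsequences
  have hA := A_eq_Fdp seq.toList sub.toList 0 0
  simp only [List.drop_zero, Nat.sub_zero, List.take_length] at hA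
  rw [num_subsequences, hA, B_eq_Fdp]
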